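-- pv_equiv track=rewrite | github.com/sueszli/vector-database-benchmark | dataset/python-mutated/pep8-1.7.0.py | expand_indent
-- ===== SOURCE A (Python) =====
-- def expand_indent(line):
--     if False:
--         return 10
--     "Return the amount of indentation.\n\n    Tabs are expanded to the next multiple of 8.\n\n    >>> expand_indent('    ')\n    4\n    >>> expand_indent('\\t')\n    8\n    >>> expand_indent('       \\t')\n    8\n    >>> expand_indent('        \\t')\n    16\n    "
--     if '\t' not in line:
--         return len(line) - len(line.lstrip())
--     result = 0
--     for char in line:
--         if char == '\t':
--             result = result // 8 * 8 + 8
--         elif char == ' ':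
--             result += 1
--         else:
--             break
--     return result
-- ===== SOURCE B (Python) =====
-- def expand_indent(line):
--     if '\t' not in line:
--         return len(line) - len(line.lstrip())
--     prefix = line[:len(line) - len(line.lstrip(' \t'))]
--     return len(prefix.expandtabs())
-- ===== Notes on version B (the rewrite author's own statement) =====
-- stated objective: idiomatic
-- what changed: The explicit per-character accumulation loop with break is replaced by slicing off the leading run of indentation characters (via lstrip with a space-and-tab argument) and measuring it with str.expandtabs(), the standard-library primitive for tab expansion.
import Mathlib
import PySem

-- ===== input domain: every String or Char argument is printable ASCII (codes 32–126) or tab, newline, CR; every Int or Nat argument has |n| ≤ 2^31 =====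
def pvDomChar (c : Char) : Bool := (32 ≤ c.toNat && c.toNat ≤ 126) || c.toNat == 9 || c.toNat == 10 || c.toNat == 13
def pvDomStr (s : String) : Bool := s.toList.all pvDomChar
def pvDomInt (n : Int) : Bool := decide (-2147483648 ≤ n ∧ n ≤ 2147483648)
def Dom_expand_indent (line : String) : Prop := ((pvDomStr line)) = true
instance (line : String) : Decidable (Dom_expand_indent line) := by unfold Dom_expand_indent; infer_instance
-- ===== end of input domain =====

-- B replaces A's per-character tab-stop accumulation loop by slicing off the leading
-- space/tab run and measuring it with expandtabs (more idiomatic; same behaviour).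


-- ===== PORT A =====
-- the 'for char in line: … break' loop, carrying 'result'
def expandIndentLoopA : List Char → Int → Int
  | [], result => result
  | c :: cs, result =>
    if c = '\t' then expandIndentLoopA cs (PySem.Int.floordiv result 8 * 8 + 8)
    else if c = ' ' then expandIndentLoopA cs (result + 1)
    else result

def expand_indent (line : String) : Int :=
  if PySem.Str.isIn "\t" line = false then
    (PySem.Str.len line : Int) - (PySem.Str.len (PySem.Str.lstrip line) : Int)
  else
    expandIndentLoopA line.toList 0

-- ===== PORT B =====
-- hand port of str.lstrip(' \t') (PySem has no chars-argument lstrip); exact: drops leading spaces/tabs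
def pvLstripSpTab (cs : List Char) : List Char :=
  cs.dropWhile (fun c => c = ' ' || c = '\t')

-- hand port of len(s.expandtabs()) with the default tabsize 8, tracking the line position
-- as CPython does (tab advances to the next multiple of 8, '\n'/'\r' reset the column); exact on these inputs
def pvExpandtabsLen : List Char → Nat → Nat
  | [], _ => 0
  | c :: cs, col =>
    if c = '\t' then
      let inc := 8 - col % 8
      inc + pvExpandtabsLen cs (col + inc)
    else if c = '\n' ∨ c = '\r' then 1 + pvExpandtabsLen cs 0
    else 1 + pvExpandtabsLen cs (col + 1)

def expand_indent_alt (line : String) : Int :=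
  if PySem.Str.isIn "\t" line = false then
    (PySem.Str.len line : Int) - (PySem.Str.len (PySem.Str.lstrip line) : Int)
  else
    let cs := line.toList
    let pre := PySem.List.slice cs none (some ((cs.length : Int) - ((pvLstripSpTab cs).length : Int)))
    (pvExpandtabsLen pre 0 : Int)

-- ===== PRECONDITION & SPEC =====
def Spec_expand_indent (line : String) (out : Int) : Prop := out = expand_indent_alt line
instance (line : String) (out : Int) : Decidable (Spec_expand_indent line out) := by unfold Spec_expand_indent; infer_instance

-- ===== CLAIM (what is proved, stated in full; the proofs are below) =====
def Claim_equal_expand_indent : Prop := ∀ (line : String), Dom_expand_indent line → Spec_expand_indent line (expand_indent line)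

-- ===== LEMMAS AND PROOFS =====

theorem floordiv_eight (col : Nat) :
    PySem.Int.floordiv (col : Int) 8 * 8 + 8 = ((col : Int) + (8 - col % 8 : Nat)) := by
  simp [PySem.Int.floordiv, Int.fdiv_eq_ediv]
  omega

theorem loopA_eq_expandtabs (cs : List Char) (col : Nat) :
    expandIndentLoopA cs (col : Int) =
      (col : Int) + (pvExpandtabsLen (cs.takeWhile (fun c => c = ' ' || c = '\t')) col : Int) := by
  induction cs generalizing col with
  | nil => simp [expandIndentLoopA, pvExpandtabsLen]
  | cons c cs ih =>
    have hA : expandIndentLoopA (c :: cs) (col : Int)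
        = if c = '\t' then expandIndentLoopA cs (PySem.Int.floordiv (col : Int) 8 * 8 + 8)
          else if c = ' ' then expandIndentLoopA cs ((col : Int) + 1) else (col : Int) := rfl
    rw [hA]
    by_cases ht : c = '\t'
    · subst ht
      rw [if_pos rfl, List.takeWhile_cons_of_pos (by decide)]
      rw [floordiv_eight,
        show ((col : Int) + ((8 - col % 8 : Nat) : Int)) = (((col + (8 - col % 8)) : Nat) : Int) by
          push_cast; ring,
        ih]
      simp [pvExpandtabsLen]
      ring
    · by_cases hs : c = ' '
      · subst hs
        rw [if_neg (show ¬(' ' = '\t') by decide), if_pos rfl,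
          List.takeWhile_cons_of_pos (by decide),
          show ((col : Int) + 1) = (((col + 1) : Nat) : Int) by push_cast; ring,
          ih]
        simp [pvExpandtabsLen]
        ring
      · rw [if_neg ht, if_neg hs, List.takeWhile_cons_of_neg (by simp [hs, ht])]
        simp [pvExpandtabsLen]

theorem slice_pre (cs : List Char) :
    PySem.List.slice cs none (some ((cs.length : Int) - ((pvLstripSpTab cs).length : Int))) =
      cs.takeWhile (fun c => c = ' ' || c = '\t') := by
  have hsplit := List.takeWhile_append_dropWhile (p := fun c => c = ' ' || c = '\t') (l := cs)
  have hlen' := congrArg List.length hsplit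
  simp only [List.length_append] at hlen'
  have hlen : (cs.takeWhile (fun c => c = ' ' || c = '\t')).length
      = cs.length - (pvLstripSpTab cs).length := by
    unfold pvLstripSpTab
    omega
  rw [show ((cs.length : Int) - ((pvLstripSpTab cs).length : Int))
      = (((cs.length - (pvLstripSpTab cs).length : Nat)) : Int) by
    unfold pvLstripSpTab at *; omega]
  rw [PySem.List.slice_to_natCast, ← hlen]
  set t := cs.takeWhile (fun c => c = ' ' || c = '\t') with ht
  set d := cs.dropWhile (fun c => c = ' ' || c = '\t') with hd
  rw [← hsplit]
  exact List.take_left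

-- ===== VERDICT (by name: the statement is the Claim_ definition above) =====
theorem expand_indent_spec : Claim_equal_expand_indent := by
  intro line _
  unfold Spec_expand_indent expand_indent expand_indent_alt
  by_cases h : PySem.Str.isIn "\t" line = false
  · rw [if_pos h, if_pos h]
  · rw [if_neg h, if_neg h]
    simp only [slice_pre]
    simpa using loopA_eq_expandtabs line.toList 0
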